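-- pv_equiv track=rewrite | github.com/showsin/rensyu | 查找最近的元音.py | closest_vowel
-- ===== SOURCE A (Python) =====
-- def closest_vowel(letter):
--     # 此处编写代码
--     vowels = ['a', 'e', 'i', 'o', 'u']
--     letter = letter.lower()
--     vowel_distance = []
--     for vowel in vowels:
--         distance = abs(ord(letter) - ord(vowel))
--         vowel_distance.append((distance, vowel))
--
--     vowel_distance.sort()
--
--     return vowel_distance[0][1]
-- ===== SOURCE B (Python) =====
-- def closest_vowel(letter):
--     c = ord(letter.lower())
--     best = 'a'
--     for v in 'eiou':
--         if abs(c - ord(v)) < abs(c - ord(best)):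
--             best = v
--     return best
-- ===== Notes on version B (the rewrite author's own statement) =====
-- stated objective: simpler
-- what changed: B replaces building a (distance, vowel) table and sorting it with a single first-minimum scan over the vowels; alphabetical vowel order reproduces A's tie-break.
-- outside the precondition, e.g. on closest_vowel('ab'): A raises TypeError, B raises TypeError; on closest_vowel(''): A raises TypeError, B raises TypeError
import Mathlib
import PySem

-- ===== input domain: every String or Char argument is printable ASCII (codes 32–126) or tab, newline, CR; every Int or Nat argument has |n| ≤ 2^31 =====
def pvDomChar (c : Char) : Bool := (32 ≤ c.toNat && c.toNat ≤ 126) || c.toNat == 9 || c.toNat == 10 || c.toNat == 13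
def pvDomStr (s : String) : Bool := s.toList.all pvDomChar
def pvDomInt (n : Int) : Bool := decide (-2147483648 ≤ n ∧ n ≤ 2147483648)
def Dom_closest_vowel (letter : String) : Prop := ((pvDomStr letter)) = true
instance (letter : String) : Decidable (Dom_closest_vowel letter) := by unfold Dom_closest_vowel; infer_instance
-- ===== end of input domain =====

-- B is simpler: one first-minimum scan over the vowels instead of building a (distance, vowel) table and sorting it.

-- shared primitive: Python's ord(s) for a one-character string (Pre_ guarantees length 1;
-- on other lengths Python raises TypeError, excluded by Pre_)
def pyOrd (s : String) : Int :=
  match s.toList with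
  | [c] => (c.toNat : Int)
  | _ => 0

-- ===== PORT A =====
-- Python's tuple sort of the 5 (distance, vowel) pairs: since the vowels are inserted in
-- strictly increasing alphabetical order, the STABLE sort by the first component (distance)
-- is exactly Python's lexicographic (distance, vowel) sort on this list.
def closest_vowel (letter : String) : String :=
  let vowels : List String := ["a", "e", "i", "o", "u"]
  let letter := PySem.Str.lower letter
  let vowel_distance : List (Int × String) :=
    vowels.foldl (fun acc vowel => acc ++ [(|pyOrd letter - pyOrd vowel|, vowel)]) []
  let sortedvd := PySem.List.sorted vowel_distance (fun p => p.1) false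
  match PySem.List.pyGet? sortedvd 0 with
  | some p => p.2
  | none => ""   -- unreachable: the list always has 5 elements

-- ===== PORT B =====
def closest_vowel_alt (letter : String) : String :=
  let c := pyOrd (PySem.Str.lower letter)
  (["e", "i", "o", "u"]).foldl
    (fun best v => if |c - pyOrd v| < |c - pyOrd best| then v else best) "a"

-- ===== PRECONDITION & SPEC =====
-- Pre_ excludes exactly the inputs where Python's ord(letter) raises TypeError (length ≠ 1)
def Pre_closest_vowel (letter : String) : Prop := letter.toList.length = 1
-- e.g. "ab" and "" are excluded: ord() raises TypeError on them in both A and B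
instance (letter : String) : Decidable (Pre_closest_vowel letter) := by
  unfold Pre_closest_vowel; infer_instance
def pvWitness_closest_vowel : String := "g"
def Spec_closest_vowel (letter : String) (out : String) : Prop := out = closest_vowel_alt letter
instance (letter : String) (out : String) : Decidable (Spec_closest_vowel letter out) := by
  unfold Spec_closest_vowel; infer_instance

-- ===== CLAIM (what is proved, stated in full; the proofs are below) =====
def Claim_equal_closest_vowel : Prop := ∀ (letter : String), Dom_closest_vowel letter → Pre_closest_vowel letter → Spec_closest_vowel letter (closest_vowel letter)

-- ===== LEMMAS AND PROOFS =====

-- the finite check: both ports agree on every one-character string with code < 127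
set_option maxRecDepth 8192 in
set_option maxHeartbeats 2000000 in
theorem closest_vowel_ball :
    ∀ n : Nat, n < 127 →
      closest_vowel (String.ofList [Char.ofNat n]) = closest_vowel_alt (String.ofList [Char.ofNat n]) := by
  decide

-- ===== VERDICT (by name: the statement is the Claim_ definition above) =====
set_option maxHeartbeats 2000000 in
theorem closest_vowel_spec : Claim_equal_closest_vowel := by
  intro letter hdom hpre
  unfold Spec_closest_vowel
  obtain ⟨c, hc⟩ : ∃ c, letter.toList = [c] := by
    cases h : letter.toList with
    | nil => simp [Pre_closest_vowel, h] at hpre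
    | cons a t =>
      cases t with
      | nil => exact ⟨a, rfl⟩
      | cons b t' => simp [Pre_closest_vowel, h] at hpre
  have hletter : letter = String.ofList [c] := by
    rw [← hc, String.ofList_toList]
  have hdomc : pvDomChar c = true := by
    have := hdom
    unfold Dom_closest_vowel pvDomStr at this
    rw [hc] at this
    simpa using this
  have hlt : c.toNat < 127 := by
    simp [pvDomChar] at hdomc
    omega
  have hofNat : Char.ofNat c.toNat = c := Char.ofNat_toNat c
  have hball := closest_vowel_ball c.toNat hlt
  rw [hofNat] at hball
  rw [hletter]
  exact hball
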